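-- pv_equiv track=rewrite | github.com/Ehsan-Home/Coding-challenge | Special_string_again/SpecialStringAgain.py | isSpecial
-- ===== SOURCE A (Python) =====
-- def isSpecial(s):
--     if len(s) % 2 == 1:
--         halfSize = int(len(s) / 2)
--         sTemp = s[:halfSize] + s[halfSize + 1:]
--         s = sTemp
--
--     firstCh = s[0]
--     for ch in s:
--         if firstCh != ch:
--             return False
--
--     return True
-- ===== SOURCE B (Python) =====
-- def isSpecial(s):
--     if len(s) % 2 == 1:
--         halfSize = len(s) // 2
--         s = s[:halfSize] + s[halfSize + 1:]
--     return s[1:] == s[:-1]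
-- ===== Notes on version B (the rewrite author's own statement) =====
-- stated objective: idiomatic
-- what changed: B replaces A's loop comparing every character against the first character with a loop-free shifted-self comparison s[1:] == s[:-1] (adjacent-pairs equality), after the same odd-length middle-removal step; on strings of length <= 1 where A raises IndexError at s[0], B naturally returns True.
import Mathlib
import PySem

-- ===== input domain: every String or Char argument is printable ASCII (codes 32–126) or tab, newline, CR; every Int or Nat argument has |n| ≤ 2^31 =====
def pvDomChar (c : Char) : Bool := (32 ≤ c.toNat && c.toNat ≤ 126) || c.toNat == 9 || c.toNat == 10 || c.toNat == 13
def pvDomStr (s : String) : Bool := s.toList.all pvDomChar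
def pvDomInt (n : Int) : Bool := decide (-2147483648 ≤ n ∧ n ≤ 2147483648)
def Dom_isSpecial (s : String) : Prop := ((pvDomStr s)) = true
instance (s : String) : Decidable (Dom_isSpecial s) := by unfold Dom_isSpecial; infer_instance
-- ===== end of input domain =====

-- B replaces A's scan-against-first-char loop with a loop-free shifted-self comparison s[1:] == s[:-1];
-- the equivalence is about return values, neither program mutates its argument.

-- ===== PORT A =====
-- if len(s) % 2 == 1: s = s[:int(len(s)/2)] + s[int(len(s)/2)+1:]
-- int(len(s)/2) is trunc-division of a nonnegative int: PySem.Int.truncdiv is exact here.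
def pvRemoveMidA (cs : List Char) : List Char :=
  if PySem.Int.mod (cs.length : Int) 2 == 1 then
    let halfSize := PySem.Int.truncdiv (cs.length : Int) 2
    PySem.List.slice cs none (some halfSize) ++ PySem.List.slice cs (some (halfSize + 1)) none
  else cs

-- for ch in s: if firstCh != ch: return False / return True
def pvLoopA (firstCh : Char) : List Char → Bool
  | [] => true
  | ch :: rest => if firstCh != ch then false else pvLoopA firstCh rest

def isSpecial (s : String) : Bool :=
  match PySem.List.pyGet? (pvRemoveMidA s.toList) 0 with   -- firstCh = s[0]; none = IndexError, excluded by Pre_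
  | none => false
  | some firstCh => pvLoopA firstCh (pvRemoveMidA s.toList)

-- ===== PORT B =====
-- if len(s) % 2 == 1: s = s[:len(s)//2] + s[len(s)//2 + 1:]
def pvRemoveMidB (cs : List Char) : List Char :=
  if PySem.Int.mod (cs.length : Int) 2 == 1 then
    let halfSize := PySem.Int.floordiv (cs.length : Int) 2
    PySem.List.slice cs none (some halfSize) ++ PySem.List.slice cs (some (halfSize + 1)) none
  else cs

-- return s[1:] == s[:-1]
def isSpecial_alt (s : String) : Bool :=
  PySem.List.slice (pvRemoveMidB s.toList) (some 1) none
    == PySem.List.slice (pvRemoveMidB s.toList) none (some (-1))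

-- ===== PRECONDITION & SPEC =====
-- Pre_ excludes exactly the strings of length ≤ 1, on which A raises IndexError at s[0].
def Pre_isSpecial (s : String) : Prop := 2 ≤ s.toList.length
instance (s : String) : Decidable (Pre_isSpecial s) := by unfold Pre_isSpecial; infer_instance
def pvWitness_isSpecial : String := "aba"

def Spec_isSpecial (s : String) (out : Bool) : Prop := out = isSpecial_alt s
instance (s : String) (out : Bool) : Decidable (Spec_isSpecial s out) := by unfold Spec_isSpecial; infer_instance

-- ===== CLAIM (what is proved, stated in full; the proofs are below) =====
def Claim_equal_isSpecial : Prop := ∀ (s : String), Dom_isSpecial s → Pre_isSpecial s → Spec_isSpecial s (isSpecial s)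

-- ===== LEMMAS AND PROOFS =====

-- the two middle-removal steps are the same list (truncdiv = floordiv on nonnegative operands)
theorem pvRemoveMid_eq (cs : List Char) : pvRemoveMidA cs = pvRemoveMidB cs := by
  unfold pvRemoveMidA pvRemoveMidB
  have h : PySem.Int.truncdiv (cs.length : Int) 2 = PySem.Int.floordiv (cs.length : Int) 2 := by
    simp only [PySem.Int.truncdiv, PySem.Int.floordiv]
    rw [Int.tdiv_eq_ediv_of_nonneg (by positivity), Int.fdiv_eq_ediv_of_nonneg _ (by norm_num)]
  rw [h]

-- A's loop is the "all characters equal firstCh" predicate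
theorem pvLoopA_eq_true_iff (c : Char) (l : List Char) :
    pvLoopA c l = true ↔ ∀ x ∈ l, x = c := by
  induction l with
  | nil => simp [pvLoopA]
  | cons ch rest ih =>
    simp only [pvLoopA, bne]
    by_cases h : c = ch
    · subst h; simpa using ih
    · simp [h, Ne.symm h]

-- the shifted-self equation on c :: l says every element of l equals c
theorem tail_eq_dropLast_iff (c : Char) (l : List Char) :
    (l = (c :: l).dropLast) ↔ ∀ x ∈ l, x = c := by
  induction l generalizing c with
  | nil => simp
  | cons x rest ih =>
    rw [List.dropLast_cons_of_ne_nil (by simp)]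
    constructor
    · intro h
      obtain ⟨h1, h2⟩ := List.cons.inj h
      subst h1
      intro y hy
      rcases List.mem_cons.mp hy with hy | hy
      · exact hy
      · exact (ih x).mp h2 y hy
    · intro hall
      have hx : x = c := hall x (by simp)
      subst hx
      have : rest = (x :: rest).dropLast := (ih x).mpr (fun y hy => hall y (List.mem_cons.mpr (Or.inr hy)))
      exact congrArg (x :: ·) this

-- under Pre_, the post-removal list is nonempty
theorem pvRemoveMidA_length (cs : List Char) (h : 2 ≤ cs.length) :
    1 ≤ (pvRemoveMidA cs).length := by
  unfold pvRemoveMidA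
  split
  · have htd : PySem.Int.truncdiv (cs.length : Int) 2 = ((cs.length / 2 : Nat) : Int) := by
      simp [PySem.Int.truncdiv]
    rw [htd]
    have hcast : ((cs.length / 2 : Nat) : Int) + 1 = ((cs.length / 2 + 1 : Nat) : Int) := by
      push_cast; ring
    simp only [hcast, pysem, List.length_append, List.length_take, List.length_drop]
    omega
  · omega

-- ===== VERDICT (by name: the statements are the Claim_ definitions above) =====
theorem isSpecial_spec : Claim_equal_isSpecial := by
  intro s _ hpre
  unfold Spec_isSpecial isSpecial isSpecial_alt
  rw [← pvRemoveMid_eq]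
  have hne : 1 ≤ (pvRemoveMidA s.toList).length := pvRemoveMidA_length _ hpre
  obtain ⟨c, l, hcl⟩ : ∃ c l, pvRemoveMidA s.toList = c :: l := by
    cases hh : pvRemoveMidA s.toList with
    | nil => rw [hh] at hne; simp at hne
    | cons c l => exact ⟨c, l, rfl⟩
  rw [hcl]
  have hget : PySem.List.pyGet? (c :: l) (0 : Int) = some c := by simp [pysem]
  rw [hget]
  show pvLoopA c (c :: l) = _
  rw [PySem.List.slice_from_one, PySem.List.slice_to_neg_one]
  have hloop : pvLoopA c (c :: l) = pvLoopA c l := by simp [pvLoopA]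
  rw [hloop]
  show _ = ((l == (c :: l).dropLast) : Bool)
  by_cases hall : ∀ x ∈ l, x = c
  · rw [(pvLoopA_eq_true_iff c l).mpr hall]
    have := (tail_eq_dropLast_iff c l).mpr hall
    simp [← this]
  · have h1 : pvLoopA c l = false := by
      cases hh : pvLoopA c l
      · rfl
      · exact absurd ((pvLoopA_eq_true_iff c l).mp hh) hall
    have h2 : l ≠ (c :: l).dropLast := fun h => hall ((tail_eq_dropLast_iff c l).mp h)
    simp [h1, h2]
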